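-- pv_equiv track=rewrite | github.com/k3coby/kmap4auth | artifact/kmap_simplify.py | get_covered_minterms
-- ===== SOURCE A (Python) =====
-- from typing import Dict, Set, List, Tuple
-- from itertools import product
--
-- def get_covered_minterms(implicant: Tuple[int, int], num_vars: int) -> Set[int]:
--     """Get all minterms covered by a prime implicant"""
--     term, mask = implicant
--     covered = set()
--
--     # Generate all minterms that match this implicant
--     # For each don't-care bit, try both 0 and 1
--     dont_care_bits = []
--     for i in range(num_vars):
--         bit_pos = num_vars - 1 - i
--         if not (mask & (1 << bit_pos)):  # This bit is don't-care
--             dont_care_bits.append(bit_pos)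
--
--     # Generate all combinations of don't-care bits
--     for dont_care_assignment in product([0, 1], repeat=len(dont_care_bits)):
--         minterm = term
--         for i, bit_value in enumerate(dont_care_assignment):
--             if bit_value:
--                 minterm |= (1 << dont_care_bits[i])
--         covered.add(minterm)
--
--     return covered
-- ===== SOURCE B (Python) =====
-- def get_covered_minterms(implicant, num_vars):
--     """Get all minterms covered by a prime implicant"""
--     term, mask = implicant
--     # Grow the set geometrically: one doubling per don't-care bit,
--     # instead of enumerating the full product of assignments.
--     covered = {term}
--     for b in range(num_vars):
--         if not (mask & (1 << b)):  # bit b is don't-care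
--             covered |= {m | (1 << b) for m in covered}
--     return covered
-- ===== Notes on version B (the rewrite author's own statement) =====
-- stated objective: faster
-- what changed: Instead of enumerating the full cartesian product of don't-care assignments and OR-ing every chosen bit in an inner loop, B grows the covered set geometrically: starting from {term}, one pass over the bit positions doubles the set at each don't-care bit.
import Mathlib
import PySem

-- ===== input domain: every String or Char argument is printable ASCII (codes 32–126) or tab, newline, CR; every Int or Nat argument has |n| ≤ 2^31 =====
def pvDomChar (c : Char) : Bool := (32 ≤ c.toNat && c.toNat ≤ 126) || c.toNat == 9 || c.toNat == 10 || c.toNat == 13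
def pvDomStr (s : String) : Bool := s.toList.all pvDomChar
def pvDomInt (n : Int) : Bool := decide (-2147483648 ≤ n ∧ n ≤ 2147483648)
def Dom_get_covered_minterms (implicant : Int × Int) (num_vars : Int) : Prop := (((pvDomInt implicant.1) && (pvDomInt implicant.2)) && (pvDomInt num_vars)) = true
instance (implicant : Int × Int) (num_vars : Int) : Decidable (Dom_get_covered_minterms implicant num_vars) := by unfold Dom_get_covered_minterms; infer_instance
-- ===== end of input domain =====

-- B replaces A's product enumeration with a geometric doubling of the covered set (objective: faster).

-- ===== PORT A =====
-- itertools.product([0, 1], repeat=k), in itertools order (last coordinate varies fastest)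
def pvProd01 : Nat → List (List Int)
  | 0 => [[]]
  | k+1 => (pvProd01 k).map (fun r => 0 :: r) ++ (pvProd01 k).map (fun r => 1 :: r)

def get_covered_minterms (implicant : Int × Int) (num_vars : Int) : List Int :=
  let term := implicant.1
  let mask := implicant.2
  let dont_care_bits : List Int :=
    (PySem.List.pyRange 0 num_vars).foldl (fun acc i =>
      let bit_pos := num_vars - 1 - i
      -- `1 << bit_pos`: bit_pos ≥ 0 for every i in range(num_vars), so `.toNat` is exact here
      if PySem.Int.band mask ((1:Int) <<< (bit_pos.toNat : Int)) == 0 then acc ++ [bit_pos] else acc) []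
  (pvProd01 dont_care_bits.length).foldl (fun covered dont_care_assignment =>
    let minterm := (PySem.List.enumerate dont_care_assignment).foldl (fun m p =>
      -- dont_care_bits[p.1]: the index is always in range; entries are ≥ 0, so `.toNat` is exact here
      if p.2 ≠ 0 then PySem.Int.bor m ((1:Int) <<< ((PySem.List.pyGetD dont_care_bits p.1 0).toNat : Int)) else m) term
    PySem.Set.add covered minterm) PySem.Set.empty

-- ===== PORT B =====
def get_covered_minterms_alt (implicant : Int × Int) (num_vars : Int) : List Int :=
  let term := implicant.1
  let mask := implicant.2
  (PySem.List.pyRange 0 num_vars).foldl (fun covered b =>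
    -- `1 << b`: b ≥ 0 for every b in range(num_vars), so `.toNat` is exact here
    if PySem.Int.band mask ((1:Int) <<< (b.toNat : Int)) == 0 then
      PySem.Set.union covered (PySem.Set.ofList (covered.map (fun m => PySem.Int.bor m ((1:Int) <<< (b.toNat : Int)))))
    else covered) (PySem.Set.ofList [term])

-- ===== PRECONDITION & SPEC =====
def Spec_get_covered_minterms (implicant : Int × Int) (num_vars : Int) (out : List Int) : Prop := out = get_covered_minterms_alt implicant num_vars
instance (implicant : Int × Int) (num_vars : Int) (out : List Int) : Decidable (Spec_get_covered_minterms implicant num_vars out) := by unfold Spec_get_covered_minterms; infer_instance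

-- ===== CLAIM (what is proved, stated in full; the proofs are below) =====
def Claim_equal_get_covered_minterms : Prop := ∀ (implicant : Int × Int) (num_vars : Int), Dom_get_covered_minterms implicant num_vars → Spec_get_covered_minterms implicant num_vars (get_covered_minterms implicant num_vars)

-- ===== LEMMAS AND PROOFS =====

-- --- bit arithmetic: (t | x) | y = (t | y) | x for nonnegative x, y ---

theorem pv_ldiff_add (n : Nat) : ∀ x : Nat, Nat.ldiff n x + (n &&& x) = n := by
  induction n using Nat.binaryRec with
  | zero =>
    intro x
    have h : Nat.ldiff 0 x = 0 := by
      apply Nat.eq_of_testBit_eq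
      intro i
      simp [Nat.testBit_ldiff]
    simp [h]
  | bit b m ih =>
    intro x
    rw [← Nat.bit_testBit_zero_shiftRight_one x, Nat.ldiff_bit, Nat.land_bit,
      Nat.bit_val, Nat.bit_val, Nat.bit_val]
    have h := ih (x >>> 1)
    cases b <;> cases x.testBit 0 <;> simp <;> omega

theorem pv_sub_and (n x : Nat) : n - (n &&& x) = Nat.ldiff n x := by
  have h := pv_ldiff_add n x
  omega

theorem pv_ldiff_swap (n x y : Nat) :
    Nat.ldiff (Nat.ldiff n x) y = Nat.ldiff (Nat.ldiff n y) x := by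
  apply Nat.eq_of_testBit_eq
  intro i
  simp [Nat.testBit_ldiff, Bool.and_assoc, Bool.and_comm, Bool.and_left_comm]

theorem pv_sub_and_swap (n x y : Nat) :
    n - (n &&& x) - ((n - (n &&& x)) &&& y) = n - (n &&& y) - ((n - (n &&& y)) &&& x) := by
  rw [pv_sub_and n x, pv_sub_and n y, pv_sub_and (Nat.ldiff n x) y, pv_sub_and (Nat.ldiff n y) x,
    pv_ldiff_swap]

theorem pv_bor_neg_nonneg (a b : Int) (ha : ¬ 0 ≤ a) (hb : 0 ≤ b) :
    PySem.Int.bor a b = -((((-a).toNat - 1) - (((-a).toNat - 1) &&& b.toNat) : Nat) : Int) - 1 := by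
  simp [PySem.Int.bor, ha, hb]

theorem pv_bor_swap (t x y : Int) (hx : 0 ≤ x) (hy : 0 ≤ y) :
    PySem.Int.bor (PySem.Int.bor t x) y = PySem.Int.bor (PySem.Int.bor t y) x := by
  by_cases ht : 0 ≤ t
  · rw [PySem.Int.bor_of_nonneg ht hx, PySem.Int.bor_of_nonneg ht hy,
      PySem.Int.bor_of_nonneg (by positivity) hy, PySem.Int.bor_of_nonneg (by positivity) hx]
    simp only [Int.toNat_natCast]
    rw [Nat.lor_assoc, Nat.lor_assoc, Nat.lor_comm x.toNat y.toNat]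
  · rw [pv_bor_neg_nonneg t x ht hx, pv_bor_neg_nonneg t y ht hy]
    rw [pv_bor_neg_nonneg _ y (by omega) hy, pv_bor_neg_nonneg _ x (by omega) hx]
    rw [show (-(-(((((-t).toNat - 1) - (((-t).toNat - 1) &&& x.toNat) : Nat) : Int)) - 1)).toNat - 1
        = ((-t).toNat - 1) - (((-t).toNat - 1) &&& x.toNat) from by omega]
    rw [show (-(-(((((-t).toNat - 1) - (((-t).toNat - 1) &&& y.toNat) : Nat) : Int)) - 1)).toNat - 1
        = ((-t).toNat - 1) - (((-t).toNat - 1) &&& y.toNat) from by omega]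
    rw [pv_sub_and_swap]

-- --- the sequence of minterms A generates, and A's per-assignment fold ---

-- value of one assignment: OR `term` with the bits of `bs` whose assignment entry is nonzero
def pvZF (t : Int) : List Int → List Int → Int
  | b :: bs, a :: r => pvZF (if a ≠ 0 then PySem.Int.bor t ((1:Int) <<< (b.toNat : Int)) else t) bs r
  | _, _ => t

-- the minterm sequence over all assignments, in itertools.product order
def pvS (t : Int) : List Int → List Int
  | [] => [t]
  | b :: bs => pvS t bs ++ (pvS t bs).map (fun m => PySem.Int.bor m ((1:Int) <<< (b.toNat : Int)))

theorem pv_length_prod01 (k : Nat) : ∀ r ∈ pvProd01 k, r.length = k := by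
  induction k with
  | zero => intro r hr; simp [pvProd01] at hr; simp [hr]
  | succ k ih =>
    intro r hr
    simp only [pvProd01, List.mem_append, List.mem_map] at hr
    rcases hr with ⟨s, hs, rfl⟩ | ⟨s, hs, rfl⟩ <;> simp [ih s hs]

theorem pv_enumFold (r : List Int) : ∀ (bs pre : List Int) (t : Int), r.length = bs.length →
    (PySem.List.enumerate r (pre.length : Int)).foldl
      (fun m p => if p.2 ≠ 0 then
          PySem.Int.bor m ((1:Int) <<< ((PySem.List.pyGetD (pre ++ bs) p.1 0).toNat : Int)) else m) t
    = pvZF t bs r := by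
  induction r with
  | nil =>
    intro bs pre t h
    cases bs with
    | nil => simp [PySem.List.enumerate_nil, pvZF]
    | cons b bs' => simp at h
  | cons a r' ih =>
    intro bs pre t h
    cases bs with
    | nil => simp at h
    | cons b bs' =>
      rw [PySem.List.enumerate_cons, List.foldl_cons]
      have hget : PySem.List.pyGetD (pre ++ b :: bs') ((pre.length : Nat) : Int) 0 = b := by
        rw [PySem.List.pyGetD_natCast]
        simp [List.getD_eq_getElem?_getD]
      rw [hget]
      have hl : pre ++ b :: bs' = (pre ++ [b]) ++ bs' := by simp
      have hs : (pre.length : Int) + 1 = (((pre ++ [b]).length : Nat) : Int) := by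
        simp [List.length_append]
      rw [hl, hs, ih bs' (pre ++ [b]) _ (by simpa using h)]
      simp [pvZF]

theorem pv_one_shl_nonneg (b : Int) : 0 ≤ (1:Int) <<< (b.toNat : Int) := by
  have h := Int.shiftLeft_natCast 1 b.toNat
  simp only [Nat.cast_one] at h
  rw [h]
  exact Int.natCast_nonneg _

theorem pv_pvS_comm (bs : List Int) : ∀ (t b : Int),
    pvS (PySem.Int.bor t ((1:Int) <<< (b.toNat : Int))) bs
      = (pvS t bs).map (fun m => PySem.Int.bor m ((1:Int) <<< (b.toNat : Int))) := by
  induction bs with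
  | nil => intro t b; simp [pvS]
  | cons c cs ih =>
    intro t b
    simp only [pvS, List.map_append, List.map_map, ih t b]
    congr 1
    apply List.map_congr_left
    intro m _
    simp only [Function.comp_apply]
    exact pv_bor_swap m _ _ (pv_one_shl_nonneg b) (pv_one_shl_nonneg c)

theorem pv_map_prod (L : List Int) : ∀ t : Int,
    (pvProd01 L.length).map (fun r => pvZF t L r) = pvS t L := by
  induction L with
  | nil => intro t; simp [pvProd01, pvZF, pvS]
  | cons b bs ih =>
    intro t
    simp only [List.length_cons, pvProd01, List.map_append, List.map_map]
    have h0 : ∀ r : List Int, pvZF t (b :: bs) (0 :: r) = pvZF t bs r := by intro r; simp [pvZF]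
    have h1 : ∀ r : List Int,
        pvZF t (b :: bs) (1 :: r) = pvZF (PySem.Int.bor t ((1:Int) <<< (b.toNat : Int))) bs r := by
      intro r; simp [pvZF]
    calc ((pvProd01 bs.length).map fun r => pvZF t (b :: bs) (0 :: r))
          ++ ((pvProd01 bs.length).map fun r => pvZF t (b :: bs) (1 :: r))
        = ((pvProd01 bs.length).map fun r => pvZF t bs r)
          ++ ((pvProd01 bs.length).map fun r => pvZF (PySem.Int.bor t ((1:Int) <<< (b.toNat : Int))) bs r) := by
          rw [List.map_congr_left (fun r _ => h0 r), List.map_congr_left (fun r _ => h1 r)]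
      _ = pvS t bs ++ pvS (PySem.Int.bor t ((1:Int) <<< (b.toNat : Int))) bs := by rw [ih, ih]
      _ = pvS t (b :: bs) := by rw [pv_pvS_comm]; rfl

-- --- building a set from a sequence: PySem.Set.update absorbs intermediate dedup ---

theorem pv_update_map (f : Int → Int) (l : List Int) : ∀ s t : PySem.Set Int,
    PySem.Set.update s ((PySem.Set.update t l).map f)
      = PySem.Set.update (PySem.Set.update s (t.map f)) (l.map f) := by
  induction l with
  | nil => intro s t; simp [PySem.Set.update_nil]
  | cons a l ih =>
    intro s t
    rw [PySem.Set.update_cons, ih s (PySem.Set.add t a), List.map_cons, PySem.Set.update_cons]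
    congr 1
    by_cases hmem : a ∈ t
    · rw [PySem.Set.add_of_mem hmem,
        PySem.Set.add_of_mem ((PySem.Set.mem_update s (t.map f) (f a)).mpr
          (Or.inr (List.mem_map_of_mem hmem)))]
    · rw [PySem.Set.add_of_not_mem hmem, List.map_append, PySem.Set.update_append]
      simp [PySem.Set.update_cons, PySem.Set.update_nil]

theorem pv_update_ofList (s : PySem.Set Int) (l : List Int) :
    PySem.Set.update s (PySem.Set.update [] l) = PySem.Set.update s l := by
  have h := pv_update_map id l s []
  simpa using h

-- B's loop body, applied to a set built from the raw sequence S
def pvStep (covered : List Int) (b : Int) : List Int :=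
  PySem.Set.union covered
    (PySem.Set.ofList (covered.map (fun m => PySem.Int.bor m ((1:Int) <<< (b.toNat : Int)))))

theorem pv_step_update (S : List Int) (b : Int) :
    pvStep (PySem.Set.update [] S) b
      = PySem.Set.update []
          (S ++ S.map (fun m => PySem.Int.bor m ((1:Int) <<< (b.toNat : Int)))) := by
  show PySem.Set.update (PySem.Set.update [] S)
      (PySem.Set.update []
        ((PySem.Set.update [] S).map (fun m => PySem.Int.bor m ((1:Int) <<< (b.toNat : Int))))) = _
  rw [pv_update_ofList, pv_update_map (fun m => PySem.Int.bor m ((1:Int) <<< (b.toNat : Int))) S _ []]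
  simp only [List.map_nil, PySem.Set.update_nil]
  rw [PySem.Set.update_append]

theorem pv_main (bits : List Int) : ∀ t : Int,
    bits.reverse.foldl pvStep [t] = PySem.Set.update [] (pvS t bits) := by
  induction bits with
  | nil =>
    intro t
    simp [pvS, PySem.Set.update_cons, PySem.Set.update_nil]
  | cons b bs ih =>
    intro t
    rw [List.reverse_cons, List.foldl_append, List.foldl_cons, List.foldl_nil, ih t,
      pv_step_update]
    rfl

-- --- A's minterm loop produces exactly update [] (pvS term L) ---

theorem pv_A_char (L : List Int) (t : Int) :
    (pvProd01 L.length).foldl (fun covered dont_care_assignment =>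
        PySem.Set.add covered ((PySem.List.enumerate dont_care_assignment).foldl (fun m p =>
          if p.2 ≠ 0 then
            PySem.Int.bor m ((1:Int) <<< ((PySem.List.pyGetD L p.1 0).toNat : Int)) else m) t))
      PySem.Set.empty
    = PySem.Set.update [] (pvS t L) := by
  rw [show PySem.Set.empty = ([] : PySem.Set Int) from rfl,
    ← PySem.Set.update_map_eq_foldl_add]
  congr 1
  have hmint : ∀ r ∈ pvProd01 L.length,
      (PySem.List.enumerate r).foldl (fun m p =>
        if p.2 ≠ 0 then
          PySem.Int.bor m ((1:Int) <<< ((PySem.List.pyGetD L p.1 0).toNat : Int)) else m) t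
      = pvZF t L r := by
    intro r hr
    have h := pv_enumFold r L [] t (by rw [pv_length_prod01 L.length r hr])
    simpa using h
  rw [List.map_congr_left hmint, pv_map_prod]

-- --- the two bit-position lists are reverses of each other ---

theorem pv_range_map_rev (n : Int) :
    (PySem.List.pyRange 0 n).map (fun i => n - 1 - i) = (PySem.List.pyRange 0 n).reverse := by
  rcases n with k | k
  · rw [show (Int.ofNat k) = ((k : Nat) : Int) from rfl, PySem.List.pyRange_zero_natCast,
      List.map_map, ← List.map_reverse]
    rw [List.range_eq_range', List.reverse_range', ← List.range_eq_range', List.map_map]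
    apply List.map_congr_left
    intro i hi
    simp only [List.mem_range] at hi
    simp only [Function.comp]
    rw [Nat.cast_sub (by omega), Nat.cast_sub (by omega)]
    simp
  · have h : PySem.List.pyRange 0 (Int.negSucc k) = [] := by
      simp [PySem.List.pyRange]
    simp [h]

-- ===== VERDICT (by name: the statement is the Claim_ definition above) =====
theorem get_covered_minterms_spec : Claim_equal_get_covered_minterms := by
  intro implicant num_vars _
  unfold Spec_get_covered_minterms
  obtain ⟨term, mask⟩ := implicant
  show get_covered_minterms (term, mask) num_vars = get_covered_minterms_alt (term, mask) num_vars
  simp only [get_covered_minterms, get_covered_minterms_alt]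
  rw [PySem.List.foldl_append_if (fun i => PySem.Int.band mask ((1:Int) <<< ((num_vars - 1 - i).toNat : Int)) == 0)
    (fun i => num_vars - 1 - i)]
  rw [List.nil_append, pv_A_char]
  have hP : (fun i => PySem.Int.band mask ((1:Int) <<< ((num_vars - 1 - i).toNat : Int)) == 0)
      = (fun b : Int => PySem.Int.band mask ((1:Int) <<< (b.toNat : Int)) == 0) ∘ (fun i => num_vars - 1 - i) := by
    funext i; rfl
  rw [hP, ← List.filter_map, pv_range_map_rev, List.filter_reverse]
  rw [show PySem.Set.ofList [term] = [term] from rfl]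
  have hstep : (fun (covered : List Int) (b : Int) =>
      if (PySem.Int.band mask ((1:Int) <<< (b.toNat : Int)) == 0) = true then
        PySem.Set.union covered
          (PySem.Set.ofList (covered.map (fun m => PySem.Int.bor m ((1:Int) <<< (b.toNat : Int)))))
      else covered)
      = (fun (covered : List Int) (b : Int) =>
      if (PySem.Int.band mask ((1:Int) <<< (b.toNat : Int)) == 0) = true then pvStep covered b
      else covered) := rfl
  rw [hstep, ← List.foldl_filter (p := fun b : Int => PySem.Int.band mask ((1:Int) <<< (b.toNat : Int)) == 0)
      (f := pvStep)]
  have h := pv_main (((PySem.List.pyRange 0 num_vars).filter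
      (fun b : Int => PySem.Int.band mask ((1:Int) <<< (b.toNat : Int)) == 0)).reverse) term
  rw [List.reverse_reverse] at h
  exact h.symm
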